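-- pv_equiv track=rewrite | github.com/Lautloserspieler/JarvisCore | core/command_processor.py | _extract_emergency_actions
-- ===== SOURCE A (Python) =====
-- from typing import Dict, Any, Optional, List, Tuple, Set, Sequence, Union
--
-- def _extract_emergency_actions(text: str) -> Set[str]:
--     actions: Set[str] = set()
--     if not text:
--         return {'lock', 'alarm'}
--     if any(token in text for token in ('netz', 'wlan', 'internet', 'offline', 'disconnect', 'netzwerk')):
--         actions.add('disconnect')
--     if any(token in text for token in ('alarm', 'sirene', 'ton', 'laut')):
--         actions.add('alarm')
--     if any(token in text for token in ('sperr', 'lock', 'bildschirm sperren', 'pc sperren')):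
--         actions.add('lock')
--     if any(token in text for token in ('kamera', 'kamera an', 'kamera aktivieren')):
--         actions.add('camera')
--     if not actions:
--         actions = {'lock', 'alarm'}
--     return actions
-- ===== SOURCE B (Python) =====
-- _ACTION_KEYWORDS = (
--     ('disconnect', ('netz', 'wlan', 'internet', 'offline', 'disconnect', 'netzwerk')),
--     ('alarm', ('alarm', 'sirene', 'ton', 'laut')),
--     ('lock', ('sperr', 'lock', 'bildschirm sperren', 'pc sperren')),
--     ('camera', ('kamera', 'kamera an', 'kamera aktivieren')),
-- )
--
--
-- def _extract_emergency_actions(text: str):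
--     # Positional scan: walk the text once and prefix-match every keyword at each
--     # position (a naive multi-pattern matcher), instead of one substring search
--     # per keyword.  Correct because `kw in text` iff some suffix of text starts
--     # with kw.
--     if not text:
--         return {'lock', 'alarm'}
--     hits = set()
--     for i in range(len(text)):
--         tail = text[i:]
--         for action, keywords in _ACTION_KEYWORDS:
--             if action not in hits and any(tail.startswith(kw) for kw in keywords):
--                 hits.add(action)
--     return {a for a, _ in _ACTION_KEYWORDS if a in hits} or {'lock', 'alarm'}
-- ===== Notes on version B (the rewrite author's own statement) =====
-- stated objective: alternative
-- what changed: B scans the text position by position and prefix-matches every keyword of an action table at each position (a naive multi-pattern matcher with an accumulating hit set), instead of A's four fixed branches each doing one substring search per keyword; the result is read off the table in canonical order.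
import Mathlib
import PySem

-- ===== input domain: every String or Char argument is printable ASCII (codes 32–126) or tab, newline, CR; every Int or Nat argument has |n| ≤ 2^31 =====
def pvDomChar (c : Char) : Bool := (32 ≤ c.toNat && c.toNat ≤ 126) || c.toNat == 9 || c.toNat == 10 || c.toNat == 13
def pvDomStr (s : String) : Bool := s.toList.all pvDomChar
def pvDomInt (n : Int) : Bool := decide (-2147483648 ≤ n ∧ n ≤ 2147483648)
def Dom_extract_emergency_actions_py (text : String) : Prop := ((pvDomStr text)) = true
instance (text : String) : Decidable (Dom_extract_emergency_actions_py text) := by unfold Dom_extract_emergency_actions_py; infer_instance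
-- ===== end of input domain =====

-- B replaces A's four per-keyword substring-search branches with a positional scan of the
-- text that prefix-matches a keyword→action table at every position (naive multi-pattern
-- matching with an accumulated hit set); alternative algorithm, same cost.


-- ===== PORT A =====
def extract_emergency_actions_py (text : String) : List String :=
  let actions : PySem.Set String := PySem.Set.empty
  if text = "" then PySem.Set.ofList ["lock", "alarm"] else
  let actions := if ["netz", "wlan", "internet", "offline", "disconnect", "netzwerk"].any
      (fun token => PySem.Str.isIn token text) then PySem.Set.add actions "disconnect" else actions
  let actions := if ["alarm", "sirene", "ton", "laut"].any
      (fun token => PySem.Str.isIn token text) then PySem.Set.add actions "alarm" else actions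
  let actions := if ["sperr", "lock", "bildschirm sperren", "pc sperren"].any
      (fun token => PySem.Str.isIn token text) then PySem.Set.add actions "lock" else actions
  let actions := if ["kamera", "kamera an", "kamera aktivieren"].any
      (fun token => PySem.Str.isIn token text) then PySem.Set.add actions "camera" else actions
  let actions := if actions = [] then PySem.Set.ofList ["lock", "alarm"] else actions
  actions

-- ===== PORT B =====
def pvActionKeywords : List (String × List String) :=
  [("disconnect", ["netz", "wlan", "internet", "offline", "disconnect", "netzwerk"]),
   ("alarm", ["alarm", "sirene", "ton", "laut"]),
   ("lock", ["sperr", "lock", "bildschirm sperren", "pc sperren"]),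
   ("camera", ["kamera", "kamera an", "kamera aktivieren"])]

-- one position of the scan: the inner 'for action, keywords in _ACTION_KEYWORDS' loop body
def pvScanPos (text : String) (hits : PySem.Set String) (i : Int) : PySem.Set String :=
  let tail := PySem.Str.slice text (some i) none
  pvActionKeywords.foldl (fun hits p =>
    if !(PySem.Set.contains hits p.1) && p.2.any (fun kw => PySem.Str.startswith tail kw)
    then PySem.Set.add hits p.1 else hits) hits

def extract_emergency_actions_py_alt (text : String) : List String :=
  if text = "" then PySem.Set.ofList ["lock", "alarm"] else
  let hits : PySem.Set String :=
    (PySem.List.pyRange 0 (PySem.Str.len text) 1).foldl (pvScanPos text) PySem.Set.empty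
  let out : PySem.Set String :=
    PySem.Set.ofList ((pvActionKeywords.filter (fun p => PySem.Set.contains hits p.1)).map Prod.fst)
  if out = [] then PySem.Set.ofList ["lock", "alarm"] else out

-- ===== PRECONDITION & SPEC =====
def Spec_extract_emergency_actions_py (text : String) (out : List String) : Prop := out = extract_emergency_actions_py_alt text
instance (text : String) (out : List String) : Decidable (Spec_extract_emergency_actions_py text out) := by unfold Spec_extract_emergency_actions_py; infer_instance

-- ===== CLAIM (what is proved, stated in full; the proofs are below) =====
def Claim_equal_extract_emergency_actions_py : Prop := ∀ (text : String), Dom_extract_emergency_actions_py text → Spec_extract_emergency_actions_py text (extract_emergency_actions_py text)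

-- ===== LEMMAS AND PROOFS =====

theorem pv_contains_iff (s : List String) (x : String) : PySem.Set.contains s x = true ↔ x ∈ s := by
  constructor <;> intro h <;> simp_all [PySem.Set.contains]

-- membership after the inner loop over the table
theorem pv_mem_inner (tail : String) (L : List (String × List String)) (hits : PySem.Set String) (x : String) :
    x ∈ L.foldl (fun hits p =>
        if !(PySem.Set.contains hits p.1) && p.2.any (fun kw => PySem.Str.startswith tail kw)
        then PySem.Set.add hits p.1 else hits) hits ↔
    x ∈ hits ∨ ∃ p ∈ L, p.1 = x ∧ p.2.any (fun kw => PySem.Str.startswith tail kw) = true := by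
  induction L generalizing hits with
  | nil => simp
  | cons p L ih =>
    rw [List.foldl_cons]
    by_cases hg : (!(PySem.Set.contains hits p.1) && p.2.any (fun kw => PySem.Str.startswith tail kw)) = true
    · rw [if_pos hg, ih]
      have ha : p.2.any (fun kw => PySem.Str.startswith tail kw) = true := by
        cases hav : p.2.any (fun kw => PySem.Str.startswith tail kw)
        · rw [hav, Bool.and_false] at hg; cases hg
        · rfl
      constructor
      · rintro (hm | ⟨q, hq, hqx, hqa⟩)
        · rcases (PySem.Set.mem_add hits p.1 x).mp hm with hm | rfl
          · exact Or.inl hm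
          · exact Or.inr ⟨p, List.mem_cons_self, rfl, ha⟩
        · exact Or.inr ⟨q, List.mem_cons_of_mem _ hq, hqx, hqa⟩
      · rintro (hm | ⟨q, hq, hqx, hqa⟩)
        · exact Or.inl ((PySem.Set.mem_add hits p.1 x).mpr (Or.inl hm))
        · rcases List.mem_cons.mp hq with rfl | hq
          · exact Or.inl ((PySem.Set.mem_add hits q.1 x).mpr (Or.inr hqx.symm))
          · exact Or.inr ⟨q, hq, hqx, hqa⟩
    · rw [if_neg hg, ih]
      constructor
      · rintro (hm | ⟨q, hq, hqx, hqa⟩)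
        · exact Or.inl hm
        · exact Or.inr ⟨q, List.mem_cons_of_mem _ hq, hqx, hqa⟩
      · rintro (hm | ⟨q, hq, hqx, hqa⟩)
        · exact Or.inl hm
        · rcases List.mem_cons.mp hq with rfl | hq
          · left
            have hc : PySem.Set.contains hits q.1 = true := by
              cases hcv : PySem.Set.contains hits q.1
              · exact absurd (by rw [hcv, hqa]; rfl) hg
              · rfl
            exact hqx ▸ (pv_contains_iff hits q.1).mp hc
          · exact Or.inr ⟨q, hq, hqx, hqa⟩

-- membership after the outer positional scan
theorem pv_mem_outer (text : String) (js : List Int) (hits : PySem.Set String) (x : String) :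
    x ∈ js.foldl (pvScanPos text) hits ↔
    x ∈ hits ∨ ∃ i ∈ js, ∃ p ∈ pvActionKeywords, p.1 = x ∧
      p.2.any (fun kw => PySem.Str.startswith (PySem.Str.slice text (some i) none) kw) = true := by
  induction js generalizing hits with
  | nil => simp
  | cons j js ih =>
    rw [List.foldl_cons, ih]
    unfold pvScanPos
    rw [pv_mem_inner]
    constructor
    · rintro ((h | ⟨p, hp, hpx, hka⟩) | ⟨i, hi, hrest⟩)
      · exact Or.inl h
      · exact Or.inr ⟨j, by simp, p, hp, hpx, hka⟩
      · exact Or.inr ⟨i, by simp [hi], hrest⟩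
    · rintro (h | ⟨i, hi, hrest⟩)
      · exact Or.inl (Or.inl h)
      · rcases List.mem_cons.mp hi with rfl | hi
        · exact Or.inl (Or.inr hrest)
        · exact Or.inr ⟨i, hi, hrest⟩

-- a keyword occurs as a prefix at some scanned position iff it is a substring
theorem pv_pos_iff_isIn (text kw : String) (hk : kw.toList ≠ []) :
    (∃ i ∈ PySem.List.pyRange 0 (PySem.Str.len text) 1,
        PySem.Str.startswith (PySem.Str.slice text (some i) none) kw = true) ↔
    PySem.Str.isIn kw text = true := by
  have hlen : PySem.Str.len text = (text.toList.length : Int) := by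
    simp [PySem.Str.len_eq]
  constructor
  · rintro ⟨i, hi, hsw⟩
    rcases PySem.List.mem_pyRange_one.mp hi with ⟨h0, _⟩
    rw [PySem.Str.startswith_eq, PySem.Str.toList_slice, PySem.Chars.slice_eq_listSlice,
        PySem.List.slice_from _ h0, PySem.Chars.startswith_iff] at hsw
    rw [PySem.Str.isIn_eq, ← PySem.Chars.exists_prefix_drop_iff_isIn]
    exact ⟨i.toNat, hsw⟩
  · intro h
    rw [PySem.Str.isIn_eq, ← PySem.Chars.exists_prefix_drop_iff_isIn] at h
    rcases h with ⟨j, hj⟩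
    have hjlt : j < text.toList.length := by
      by_contra hge
      rw [List.drop_eq_nil_of_le (by omega)] at hj
      exact hk (List.prefix_nil.mp hj)
    refine ⟨(j : Int), PySem.List.mem_pyRange_one.mpr ⟨by positivity, by rw [hlen]; exact_mod_cast hjlt⟩, ?_⟩
    rw [PySem.Str.startswith_eq, PySem.Str.toList_slice, PySem.Chars.slice_eq_listSlice,
        PySem.List.slice_from_natCast, PySem.Chars.startswith_iff]
    exact hj

-- x is in the final hit set iff its table row has a keyword occurring in the text
theorem pv_mem_hits (text : String) (x : String) :
    x ∈ (PySem.List.pyRange 0 (PySem.Str.len text) 1).foldl (pvScanPos text) PySem.Set.empty ↔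
    ∃ p ∈ pvActionKeywords, p.1 = x ∧ p.2.any (fun kw => PySem.Str.isIn kw text) = true := by
  rw [pv_mem_outer]
  have hne : ∀ p ∈ pvActionKeywords, ∀ kw ∈ p.2, kw.toList ≠ [] := by decide
  simp only [PySem.Set.empty, List.not_mem_nil, false_or, List.any_eq_true]
  constructor
  · rintro ⟨i, hi, p, hp, hpx, kw, hkw, hsw⟩
    exact ⟨p, hp, hpx, kw, hkw, (pv_pos_iff_isIn text kw (hne p hp kw hkw)).mp ⟨i, hi, hsw⟩⟩
  · rintro ⟨p, hp, hpx, kw, hkw, hin⟩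
    rcases (pv_pos_iff_isIn text kw (hne p hp kw hkw)).mpr hin with ⟨i, hi, hsw⟩
    exact ⟨i, hi, p, hp, hpx, kw, hkw, hsw⟩

-- ===== VERDICT (by name: the statement is the Claim_ definition above) =====
theorem extract_emergency_actions_py_spec : Claim_equal_extract_emergency_actions_py := by
  intro text _
  unfold Spec_extract_emergency_actions_py extract_emergency_actions_py extract_emergency_actions_py_alt
  by_cases h : text = ""
  · simp [h]
  · simp only [if_neg h]
    set hits := (PySem.List.pyRange 0 (PySem.Str.len text) 1).foldl (pvScanPos text) PySem.Set.empty with hhits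
    have key : ∀ x, PySem.Set.contains hits x = true ↔
        ∃ p ∈ pvActionKeywords, p.1 = x ∧ p.2.any (fun kw => PySem.Str.isIn kw text) = true := by
      intro x; rw [pv_contains_iff, hhits, pv_mem_hits]
    have cd := key "disconnect"
    have ca := key "alarm"
    have cl := key "lock"
    have ck := key "camera"
    simp only [pvActionKeywords, List.mem_cons, List.not_mem_nil, or_false] at cd ca cl ck
    by_cases hd : (["netz", "wlan", "internet", "offline", "disconnect", "netzwerk"].any
        (fun token => PySem.Str.isIn token text)) = true <;>
      by_cases ha : (["alarm", "sirene", "ton", "laut"].any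
        (fun token => PySem.Str.isIn token text)) = true <;>
      by_cases hl : (["sperr", "lock", "bildschirm sperren", "pc sperren"].any
        (fun token => PySem.Str.isIn token text)) = true <;>
      by_cases hk : (["kamera", "kamera an", "kamera aktivieren"].any
        (fun token => PySem.Str.isIn token text)) = true <;>
      simp_all [pvActionKeywords, PySem.Set.empty, PySem.Set.add, PySem.Set.ofList]
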